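-- pv_equiv track=rewrite | github.com/kilitary/py-sec-tools | crawler.py | _generate_share_dictionary
-- ===== SOURCE A (Python) =====
-- def _generate_share_dictionary(headerRow):
--     """Accepts a variable width, white space delimited string that we attempt
--         to divine column delimiters from. Returns a dictionary of field names
--         and a tuple with start/stop slice positions"""
--
--     # This used to be a more complex problem before I realized I didn't have
--     # to do GET * in my source. GET Name, Path greatly simplifies
--     # but this code is generic so I keep it as is
--
--     header = headerRow
--     fields = header.split()
--     tempOrds = {}
--     ords = {}
--     # Populate the temporary ordinals dictionary with field name and the
--     # starting, zero based, ordinal for it.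
--     # i.e. given
--     # Name     Path
--     # 01234567890123456789
--     # we would expect Name:0, Path:9
--     for field in fields:
--         tempOrds[field] = headerRow.index(field)
--
--     # Knowing our starting ordinal positions, we will build a dictionary of tuples
--     # that contain starting and ending positions of our fields
--     for iter in range(0, len(fields) - 1):
--         ords[fields[iter]] = (tempOrds[fields[iter]], tempOrds[fields[iter + 1]])
--
--     # handle the last element
--     ords[fields[-1]] = (tempOrds[fields[-1]], len(headerRow))
--
--     return ords
-- ===== SOURCE B (Python) =====
-- def _generate_share_dictionary(headerRow):
--     """Sweep the header left-to-right once, resolving the first occurrence of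
--     every field simultaneously, then fold over the fields right-to-left
--     carrying the stop bound; finally materialise the dict in field order."""
--     fields = headerRow.split()
--     pending = set(fields)
--     firstpos = {}
--     p = 0
--     while pending:
--         for f in list(pending):
--             if headerRow.startswith(f, p):
--                 firstpos[f] = p
--                 pending.discard(f)
--         p += 1
--     items = []
--     bound = len(headerRow)
--     for f in reversed(fields):
--         items.append((f, (firstpos[f], bound)))
--         bound = firstpos[f]
--     return dict(reversed(items))
-- ===== Notes on version B (the rewrite author's own statement) =====
-- stated objective: alternative
-- what changed: B replaces A's per-field headerRow.index searches, temporary ordinals dict, index-driven pairing loop and separate last-element fixup by a single left-to-right position sweep that resolves the first occurrence of all fields simultaneously, followed by a reverse fold over the fields that carries the stop bound as an accumulator; B returns {} where A raises IndexError on a whitespace-only header.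
import Mathlib
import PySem

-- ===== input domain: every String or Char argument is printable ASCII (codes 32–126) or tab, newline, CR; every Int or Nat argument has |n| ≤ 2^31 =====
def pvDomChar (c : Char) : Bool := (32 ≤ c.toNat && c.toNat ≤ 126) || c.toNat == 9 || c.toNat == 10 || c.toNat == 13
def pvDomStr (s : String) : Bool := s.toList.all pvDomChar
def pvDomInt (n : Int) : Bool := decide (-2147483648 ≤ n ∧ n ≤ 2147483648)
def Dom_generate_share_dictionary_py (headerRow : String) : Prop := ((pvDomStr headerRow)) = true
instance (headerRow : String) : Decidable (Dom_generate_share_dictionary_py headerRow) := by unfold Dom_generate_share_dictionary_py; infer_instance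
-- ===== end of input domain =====

-- B replaces A's per-field str.index searches and two dict-building loops (plus last-element fixup)
-- by one left-to-right position sweep resolving all fields' first occurrences simultaneously, then a
-- reverse fold over the fields carrying the stop bound (objective: alternative); B returns {} where A
-- raises IndexError on a whitespace-only header (those inputs are excluded by Pre_).

-- ===== PORT A =====
-- headerRow.index(field) always succeeds here (field comes from headerRow.split()), so it is
-- exactly PySem.Str.find; tempOrds[...] lookups always hit a present key, so getD _ 0 is exact.
def generate_share_dictionary_py (headerRow : String) : List (String × Int × Int) :=
  let fields := PySem.Str.split₀ headerRow
  let tempOrds := fields.foldl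
    (fun d f => d.insert f (PySem.Str.find headerRow f)) PySem.Dict.empty
  let ords := (PySem.List.pyRange 0 ((fields.length : Int) - 1) 1).foldl
    (fun d i =>
      d.insert (PySem.List.pyGetD fields i "")
        (tempOrds.getD (PySem.List.pyGetD fields i "") 0,
         tempOrds.getD (PySem.List.pyGetD fields (i + 1) "") 0)) PySem.Dict.empty
  match PySem.List.pyGet? fields (-1) with
  | none => []   -- Python raises IndexError here (empty fields); excluded by Pre_
  | some last =>
      (ords.insert last (tempOrds.getD last 0, (PySem.Str.len headerRow : Int))).items

-- ===== PORT B =====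
-- Python's 'while pending:' sweep; the fuel argument (len+1, enough positions to reach every
-- field's occurrence) only makes the recursion structural, the loop exits via 'pending = []'.
-- 'headerRow.startswith(f, p)' with 0 ≤ p is exactly Chars.startswith on (toList.drop p).
def pvSweep (hc : List Char) (fuel : Nat) (p : Nat) (pending : List String)
    (fp : PySem.Dict String Int) : PySem.Dict String Int :=
  match fuel with
  | 0 => fp
  | Nat.succ fuel' =>
    if pending = [] then fp
    else
      let fp' := (pending.filter (fun f => PySem.Chars.startswith (hc.drop p) f.toList)).foldl
        (fun d f => d.insert f (p : Int)) fp
      let pending' := pending.filter (fun f => !PySem.Chars.startswith (hc.drop p) f.toList)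
      pvSweep hc fuel' (p + 1) pending' fp'

def generate_share_dictionary_py_alt (headerRow : String) : List (String × Int × Int) :=
  let fields := PySem.Str.split₀ headerRow
  let firstpos := pvSweep headerRow.toList (headerRow.toList.length + 1) 0
    (PySem.Set.ofList fields) PySem.Dict.empty
  let st := fields.reverse.foldl
    (fun (st : List (String × Int × Int) × Int) f =>
      (st.1 ++ [(f, (firstpos.getD f 0, st.2))], firstpos.getD f 0))
    ([], (headerRow.toList.length : Int))
  (st.1.reverse.foldl (fun d pr => d.insert pr.1 pr.2) PySem.Dict.empty).items

-- ===== PRECONDITION & SPEC =====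
-- Pre_ excludes exactly the whitespace-only headers, on which A raises IndexError at fields[-1].
def Pre_generate_share_dictionary_py (headerRow : String) : Prop :=
  PySem.Str.split₀ headerRow ≠ []
instance (headerRow : String) : Decidable (Pre_generate_share_dictionary_py headerRow) := by
  unfold Pre_generate_share_dictionary_py; infer_instance
def pvWitness_generate_share_dictionary_py : String := "Name     Path"

def Spec_generate_share_dictionary_py (headerRow : String) (out : List (String × Int × Int)) : Prop := out = generate_share_dictionary_py_alt headerRow
instance (headerRow : String) (out : List (String × Int × Int)) : Decidable (Spec_generate_share_dictionary_py headerRow out) := by unfold Spec_generate_share_dictionary_py; infer_instance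

-- ===== CLAIM (what is proved, stated in full; the proofs are below) =====
def Claim_equal_generate_share_dictionary_py : Prop := ∀ (headerRow : String), Dom_generate_share_dictionary_py headerRow → Pre_generate_share_dictionary_py headerRow → Spec_generate_share_dictionary_py headerRow (generate_share_dictionary_py headerRow)

-- ===== LEMMAS AND PROOFS =====

theorem getD_foldl_insert_of_not_mem {κ ν : Type} [BEq κ] [LawfulBEq κ] (g : κ → ν)
    (l : List κ) (d : PySem.Dict κ ν) (f : κ) (d0 : ν) (hf : f ∉ l) :
    (l.foldl (fun d x => d.insert x (g x)) d).getD f d0 = d.getD f d0 := by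
  induction l generalizing d with
  | nil => rfl
  | cons x xs ih =>
    simp only [List.foldl_cons]
    rw [ih _ (fun h => hf (List.mem_cons_of_mem _ h)),
        PySem.Dict.getD_insert_of_ne]
    exact fun h => hf (h ▸ List.mem_cons_self ..)

theorem getD_foldl_insert_of_mem {κ ν : Type} [BEq κ] [LawfulBEq κ] (g : κ → ν)
    (l : List κ) (d : PySem.Dict κ ν) (f : κ) (d0 : ν) (hf : f ∈ l) :
    (l.foldl (fun d x => d.insert x (g x)) d).getD f d0 = g f := by
  induction l generalizing d with
  | nil => cases hf
  | cons x xs ih =>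
    simp only [List.foldl_cons]
    by_cases hx : f ∈ xs
    · exact ih _ hx
    · have hfx : f = x := by
        rcases List.mem_cons.mp hf with h | h
        · exact h
        · exact absurd h hx
      subst hfx
      rw [getD_foldl_insert_of_not_mem g xs _ f d0 hx, PySem.Dict.getD_insert_self]

theorem split₀_go_infix (s : List Char) : ∀ (cur : List Char) (acc : List (List Char)) (f : List Char),
    f ∈ PySem.Chars.split₀.go s cur acc → f ∈ acc ∨ f <:+: (cur.reverse ++ s) := by
  induction s with
  | nil =>
    intro cur acc f hf
    unfold PySem.Chars.split₀.go at hf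
    split at hf
    · left; simpa using hf
    · rcases (by simpa using hf : f ∈ acc ∨ f = cur.reverse) with h | h
      · exact Or.inl h
      · right; subst h
        simpa using List.prefix_append cur.reverse ([] : List Char) |>.isInfix
  | cons c rest ih =>
    intro cur acc f hf
    unfold PySem.Chars.split₀.go at hf
    split at hf
    · split at hf
      · rcases ih [] acc f hf with h | h
        · exact Or.inl h
        · right
          simp only [List.reverse_nil, List.nil_append] at h
          exact h.trans ((List.suffix_cons c rest).trans (List.suffix_append _ _)).isInfix
      · rcases ih [] (cur.reverse :: acc) f hf with h | h
        · rcases List.mem_cons.mp h with h1 | h1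
          · right; subst h1
            exact (List.prefix_append cur.reverse (c :: rest)).isInfix
          · exact Or.inl h1
        · right
          simp only [List.reverse_nil, List.nil_append] at h
          exact h.trans ((List.suffix_cons c rest).trans (List.suffix_append _ _)).isInfix
    · rcases ih (c :: cur) acc f hf with h | h
      · exact Or.inl h
      · right
        simpa [List.append_assoc] using h


theorem mem_split₀_infix (s f : List Char) (hf : f ∈ PySem.Chars.split₀ s) : f <:+: s := by
  rcases split₀_go_infix s [] [] f (by unfold PySem.Chars.split₀ at hf; exact hf) with h | h
  · cases h
  · simp at h; exact h

theorem sweep_getD_of_not_mem (hc : List Char) (fuel : Nat) : ∀ (p : Nat) (pending : List String)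
    (fp : PySem.Dict String Int) (f : String) (d0 : Int), f ∉ pending →
    (pvSweep hc fuel p pending fp).getD f d0 = fp.getD f d0 := by
  induction fuel with
  | zero => intro _ _ _ _ _ _; rfl
  | succ fuel ih =>
    intro p pending fp f d0 hf
    unfold pvSweep
    split
    · rfl
    · rw [ih]
      · exact getD_foldl_insert_of_not_mem (fun _ => (p : Int)) _ _ _ _
          (fun h => hf (List.mem_filter.mp h).1)
      · exact fun h => hf (List.mem_filter.mp h).1

theorem sweep_getD_of_mem (hc : List Char) (fuel : Nat) : ∀ (p : Nat) (pending : List String)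
    (fp : PySem.Dict String Int) (f : String) (d0 : Int),
    f ∈ pending →
    0 ≤ PySem.Chars.find hc f.toList →
    p ≤ (PySem.Chars.find hc f.toList).toNat →
    (PySem.Chars.find hc f.toList).toNat < p + fuel →
    (pvSweep hc fuel p pending fp).getD f d0 = PySem.Chars.find hc f.toList := by
  induction fuel with
  | zero => intro p _ _ _ _ _ _ hlo hhi; omega
  | succ fuel ih =>
    intro p pending fp f d0 hf hge hlo hhi
    unfold pvSweep
    split
    · exact absurd (‹pending = []› ▸ hf) (List.not_mem_nil)
    · by_cases hp : p = (PySem.Chars.find hc f.toList).toNat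
      · -- f matches at p: inserted now, untouched afterwards
        have hpre : f.toList <+: hc.drop p := hp ▸ (PySem.Chars.find_spec hge).1
        have hsw : PySem.Chars.startswith (hc.drop p) f.toList = true :=
          (PySem.Chars.startswith_iff _ _).mpr hpre
        have hmemF : f ∈ pending.filter (fun f => PySem.Chars.startswith (hc.drop p) f.toList) :=
          List.mem_filter.mpr ⟨hf, by simp [hsw]⟩
        have hnotP : f ∉ pending.filter (fun f => !PySem.Chars.startswith (hc.drop p) f.toList) := by
          intro h
          have := (List.mem_filter.mp h).2
          simp [hsw] at this
        rw [sweep_getD_of_not_mem hc fuel _ _ _ _ _ hnotP,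
            getD_foldl_insert_of_mem (fun _ => (p : Int)) _ _ _ _ hmemF]
        omega
      · -- no match at p: f stays pending
        have hlt : p < (PySem.Chars.find hc f.toList).toNat := by omega
        have hnsw : ¬ f.toList <+: hc.drop p := (PySem.Chars.find_spec hge).2 p hlt
        have hsw : PySem.Chars.startswith (hc.drop p) f.toList = false := by
          rcases Bool.eq_false_or_eq_true (PySem.Chars.startswith (hc.drop p) f.toList) with h | h
          · exact absurd ((PySem.Chars.startswith_iff _ _).mp h) hnsw
          · exact h
        exact ih (p + 1) _ _ f d0
          (List.mem_filter.mpr ⟨hf, by simp [hsw]⟩) hge (by omega) (by omega)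

theorem foldr_items (v : String → Int) (L : Int) : ∀ (fs : List String),
    fs.foldr (fun f (st : List (String × Int × Int) × Int) =>
        (st.1 ++ [(f, (v f, st.2))], v f)) ([], L)
      = ((List.zipWith (fun f stop => (f, (v f, stop))) fs ((fs.map v).drop 1 ++ [L])).reverse,
         ((fs.map v) ++ [L]).headD L) := by
  intro fs
  induction fs with
  | nil => simp
  | cons f rest ih =>
    simp only [List.foldr_cons, ih, List.map_cons, List.drop_succ_cons, List.drop_zero]
    cases rest with
    | nil => simp
    | cons g rs =>
      simp

theorem main_equiv : ∀ (headerRow : String), Pre_generate_share_dictionary_py headerRow →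
    generate_share_dictionary_py headerRow = generate_share_dictionary_py_alt headerRow := by
  intro h hp
  unfold Pre_generate_share_dictionary_py at hp
  unfold generate_share_dictionary_py generate_share_dictionary_py_alt
  simp only []
  set fields := PySem.Str.split₀ h with hfields
  set g : String → Int := fun f => PySem.Str.find h f with hg
  set T := fields.foldl (fun d f => d.insert f (g f)) PySem.Dict.empty with hT
  set fp := pvSweep h.toList (h.toList.length + 1) 0 (PySem.Set.ofList fields) PySem.Dict.empty with hfp
  set v : String → Int := fun f => fp.getD f 0 with hv
  set n := fields.length with hn
  have hn1 : 1 ≤ n := List.length_pos_iff.mpr hp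
  set m := n - 1 with hm
  have hnm : n = m + 1 := by omega
  set positions := fields.map g with hpos
  set L : Int := ((h.toList.length : Nat) : Int) with hL
  set stops := positions.drop 1 ++ [L] with hstops
  have hposlen : positions.length = n := by rw [hpos, List.length_map]
  have hstopslen : stops.length = n := by
    rw [hstops, List.length_append, List.length_drop, hposlen]
    simp only [List.length_singleton]
    omega
  -- the sweep computes exactly headerRow.index(f) for every field f
  have hvg : ∀ f ∈ fields, v f = g f := by
    intro f hf
    have hinf : f.toList <:+: h.toList := by
      apply mem_split₀_infix
      rw [← PySem.Str.split₀_map_toList]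
      exact List.mem_map_of_mem hf
    have hge : 0 ≤ PySem.Chars.find h.toList f.toList :=
      (PySem.Chars.find_nonneg_iff _ _).mpr hinf
    have hle := PySem.Chars.find_le_length h.toList f.toList
    show fp.getD f 0 = g f
    rw [hfp, sweep_getD_of_mem h.toList _ 0 _ _ f 0
      ((PySem.Set.mem_ofList _ _).mpr hf) hge (by omega) (by omega), hg]
    simp
  have hmapv : fields.map v = positions := by
    rw [hpos]; exact List.map_congr_left hvg
  have hLs : (PySem.Str.len h : Int) = L := by rw [hL]; simp
  -- closed forms
  have hgetD : ∀ (i : Nat) (hi : i < n), fields.getD i "" = fields[i]'(by omega) := by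
    intro i hi; exact List.getD_eq_getElem _ _ (by omega)
  have hTgetD : ∀ i : Nat, i < n → T.getD (fields.getD i "") 0 = g (fields.getD i "") := by
    intro i hi
    exact getD_foldl_insert_of_mem g fields _ _ _ (by rw [hgetD i hi]; exact List.getElem_mem _)
  have hposget : ∀ i : Nat, i < n → positions.getD i 0 = g (fields.getD i "") := by
    intro i hi
    rw [List.getD_eq_getElem?_getD, hpos, List.getElem?_map,
        List.getElem?_eq_getElem (by omega : i < fields.length), hgetD i hi]
    rfl
  have hd1 : (List.drop 1 positions).length = m := by rw [List.length_drop, hposlen]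
  have hstopsget : ∀ i : Nat, i < m → stops.getD i 0 = positions.getD (i+1) 0 := by
    intro i hi
    have e : 1 + i = i + 1 := by omega
    rw [List.getD_eq_getElem?_getD, List.getD_eq_getElem?_getD, hstops,
        List.getElem?_append_left (by omega),
        List.getElem?_drop, e]
  have hstopslast : stops.getD m 0 = L := by
    have e : m - (List.drop 1 positions).length = 0 := by omega
    rw [List.getD_eq_getElem?_getD, hstops,
        List.getElem?_append_right (by omega), e]
    rfl
  -- last element
  have hlast : PySem.List.pyGet? fields (-1) = some (fields.getD m "") := by
    rw [PySem.List.pyGet?_neg_one, List.getLast?_eq_getElem?, hgetD m (by omega)]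
    exact List.getElem?_eq_getElem (by omega)
  -- B's item list as a map over range
  set F : Nat → String × Int × Int :=
    fun i => (fields.getD i "", (positions.getD i 0, stops.getD i 0)) with hF
  have hzipW : List.zipWith (fun f stop => (f, (v f, stop))) fields ((fields.map v).drop 1 ++ [L])
      = (List.range n).map F := by
    rw [hmapv, ← hstops]
    apply List.ext_getElem
    · simp only [List.length_zipWith, List.length_map, List.length_range, hstopslen, ← hn]
      omega
    · intro i h1 h2
      have hi : i < n := by simpa using h2
      simp only [List.getElem_zipWith, List.getElem_map, List.getElem_range, hF]
      simp only [Prod.mk.injEq]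
      refine ⟨(hgetD i hi).symm, ?_, (List.getD_eq_getElem _ _ (by omega)).symm⟩
      rw [hvg _ (List.getElem_mem _), hposget i hi, hgetD i hi]
  -- A's range as a Nat range
  have hrange : PySem.List.pyRange 0 ((n : Int) - 1) 1 = (List.range m).map (fun k : Nat => (0 : Int) + (k : Int)) := by
    have e : ((n : Int) - 1 - 0).toNat = m := by omega
    rw [PySem.List.pyRange_one, e]
  have hbody : ∀ (d : PySem.Dict String (Int × Int)), ∀ x ∈ List.range m,
      d.insert (PySem.List.pyGetD fields ((0 : Int) + x) "")
        (T.getD (PySem.List.pyGetD fields ((0 : Int) + x) "") 0,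
         T.getD (PySem.List.pyGetD fields ((0 : Int) + x + 1) "") 0)
      = d.insert (F x).1 (F x).2 := by
    intro d x hx
    have hxm : x < m := List.mem_range.mp hx
    have e1 : (0 : Int) + x = (x : Int) := by omega
    have e2 : (x : Int) + 1 = ((x + 1 : Nat) : Int) := by push_cast; omega
    rw [e1, e2, PySem.List.pyGetD_natCast, PySem.List.pyGetD_natCast]
    rw [hTgetD x (by omega), hTgetD (x+1) (by omega)]
    rw [hF]
    simp only []
    rw [hposget x (by omega), hstopsget x hxm, hposget (x+1) (by omega)]
  -- B's fold through the foldr characterisation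
  rw [List.foldl_reverse (l := fields), foldr_items, List.reverse_reverse, hzipW]
  rw [hlast, hLs, hrange, List.foldl_map, List.foldl_map, hnm, List.range_succ,
      List.foldl_append]
  simp only [List.foldl_cons, List.foldl_nil]
  congr 1
  have hd : (List.foldl (fun (x : PySem.Dict String (Int × Int)) (y : Nat) =>
        x.insert (PySem.List.pyGetD fields ((0 : Int) + y) "")
          (T.getD (PySem.List.pyGetD fields ((0 : Int) + y) "") 0,
           T.getD (PySem.List.pyGetD fields ((0 : Int) + y + 1) "") 0))
        PySem.Dict.empty (List.range m))
      = List.foldl (fun x y => x.insert (F y).1 (F y).2) PySem.Dict.empty (List.range m) :=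
    PySem.List.foldl_congr_mem _ _ _ _ hbody
  rw [hd]
  simp only [hF]
  rw [hTgetD m (by omega), hposget m (by omega), hstopslast]


-- ===== VERDICT (by name: the statement is the Claim_ definition above) =====
theorem generate_share_dictionary_py_spec : Claim_equal_generate_share_dictionary_py := by
  intro h _ hp
  unfold Spec_generate_share_dictionary_py
  exact main_equiv h hp
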